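-- pv_equiv track=rewrite | github.com/SwaroopVennapusa/Advance_DSA | Assign2/assignment_2.py | find_significant_energy_increase_iterative
-- ===== SOURCE A (Python) =====
-- def find_significant_energy_increase_iterative(A):
--
--     if not A or A.count(A[0]) == len(A):
--         return (None, None)
--
--     if len(A) == 2:
--         return (0, 1)
--
--     max_increase = A[1] - A[0]
--     max_i = 0
--     max_j = 1
--
--     min_val = A[0]
--     min_i = 0
--
--     for j in range(1, len(A)):
--         current_increase = A[j] - min_val
--
--         if current_increase > max_increase:
--             max_increase = current_increase
--             max_i = min_i
--             max_j = j
--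
--         if A[j] < min_val:
--             min_val = A[j]
--             min_i = j
--
--     return (max_i, max_j)
-- ===== SOURCE B (Python) =====
-- def find_significant_energy_increase_iterative(A):
--     n = len(A)
--     if n == 0 or all(x == A[0] for x in A):
--         return (None, None)
--     # prefmin[j] = index of the minimum of A[0..j-1], earliest on ties (prefmin[0] unused)
--     prefmin = [0, 0]
--     for j in range(2, n):
--         p = prefmin[j - 1]
--         prefmin.append(j - 1 if A[j - 1] < A[p] else p)
--     best = A[1] - A[0]
--     bi, bj = 0, 1
--     for j in range(1, n):
--         cur = A[j] - A[prefmin[j]]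
--         if cur > best:
--             best = cur
--             bi, bj = prefmin[j], j
--     return (bi, bj)
-- ===== Notes on version B (the rewrite author's own statement) =====
-- stated objective: alternative
-- what changed: Replaces the single scan carrying a scalar running minimum with a prefix-min-index table built in its own pass, followed by a separate best-increase scan that reads the table.
import Mathlib
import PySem

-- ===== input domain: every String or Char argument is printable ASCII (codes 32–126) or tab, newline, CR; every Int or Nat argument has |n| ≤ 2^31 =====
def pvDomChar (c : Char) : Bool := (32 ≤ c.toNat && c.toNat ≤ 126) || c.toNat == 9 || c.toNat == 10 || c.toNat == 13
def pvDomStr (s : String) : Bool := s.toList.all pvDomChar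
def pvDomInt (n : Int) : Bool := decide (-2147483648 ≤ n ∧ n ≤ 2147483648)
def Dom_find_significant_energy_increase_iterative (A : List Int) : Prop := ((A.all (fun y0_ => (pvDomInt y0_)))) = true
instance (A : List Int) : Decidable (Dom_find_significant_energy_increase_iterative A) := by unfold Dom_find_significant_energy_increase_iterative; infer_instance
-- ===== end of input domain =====

-- B builds a prefix-min-index table in one pass and scans it in a second pass, instead of A's
-- single scan with a scalar running minimum; alternative decomposition, same O(n) cost.

-- ===== PORT A =====
def find_significant_energy_increase_iterative (A : List Int) : Option Int × Option Int :=
  if A = [] ∨ PySem.List.count A (PySem.List.pyGetD A 0 0) = A.length then (none, none)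
  else if A.length = 2 then (some 0, some 1)
  else
    let s := (PySem.List.pyRange 1 (A.length : Int) 1).foldl
      (fun (st : Int × Int × Int × Int × Int) j =>
        let (max_inc, max_i, max_j, min_val, min_i) := st
        let cur := PySem.List.pyGetD A j 0 - min_val
        let (max_inc, max_i, max_j) :=
          if cur > max_inc then (cur, min_i, j) else (max_inc, max_i, max_j)
        if PySem.List.pyGetD A j 0 < min_val then
          (max_inc, max_i, max_j, PySem.List.pyGetD A j 0, j)
        else (max_inc, max_i, max_j, min_val, min_i))
      (PySem.List.pyGetD A 1 0 - PySem.List.pyGetD A 0 0, 0, 1, PySem.List.pyGetD A 0 0, 0)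
    (some s.2.1, some s.2.2.1)

-- ===== PORT B =====
def find_significant_energy_increase_iterative_alt (A : List Int) : Option Int × Option Int :=
  let n : Int := A.length
  if n = 0 ∨ (A.all (fun x => x == PySem.List.pyGetD A 0 0)) = true then (none, none)
  else
    let prefmin : List Int := (PySem.List.pyRange 2 n 1).foldl
      (fun (pmv : List Int) j =>
        let p := PySem.List.pyGetD pmv (j - 1) 0
        pmv ++ [if PySem.List.pyGetD A (j - 1) 0 < PySem.List.pyGetD A p 0 then j - 1 else p])
      [0, 0]
    let s := (PySem.List.pyRange 1 n 1).foldl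
      (fun (st : Int × Int × Int) j =>
        let cur := PySem.List.pyGetD A j 0 - PySem.List.pyGetD A (PySem.List.pyGetD prefmin j 0) 0
        if cur > st.1 then (cur, PySem.List.pyGetD prefmin j 0, j) else st)
      (PySem.List.pyGetD A 1 0 - PySem.List.pyGetD A 0 0, 0, 1)
    (some s.2.1, some s.2.2)

-- ===== PRECONDITION & SPEC =====
def Spec_find_significant_energy_increase_iterative (A : List Int) (out : Option Int × Option Int) : Prop := out = find_significant_energy_increase_iterative_alt A
instance (A : List Int) (out : Option Int × Option Int) : Decidable (Spec_find_significant_energy_increase_iterative A out) := by unfold Spec_find_significant_energy_increase_iterative; infer_instance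

-- ===== CLAIM (what is proved, stated in full; the proofs are below) =====
def Claim_equal_find_significant_energy_increase_iterative : Prop := ∀ (A : List Int), Dom_find_significant_energy_increase_iterative A → Spec_find_significant_energy_increase_iterative A (find_significant_energy_increase_iterative A)

-- ===== LEMMAS AND PROOFS =====

-- pm A j = index of the earliest minimum of A[0..j-1] (for 1 ≤ j)
def pm (A : List Int) : Nat → Nat
  | 0 => 0
  | (j+1) => if A.getD j 0 < A.getD (pm A j) 0 then j else pm A j

-- best-so-far triple (max_increase, max_i, max_j) after the loop iterations j = 1 .. k-1
def bestF (A : List Int) : Nat → Int × Int × Int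
  | 0 => (A.getD 1 0 - A.getD 0 0, 0, 1)
  | (k+1) =>
    if k = 0 then (A.getD 1 0 - A.getD 0 0, 0, 1)
    else
      let st := bestF A k
      let cur := A.getD k 0 - A.getD (pm A k) 0
      if cur > st.1 then (cur, (pm A k : Int), (k : Int)) else st

theorem pv_A_loop (A : List Int) (k : Nat) (hk : 1 ≤ k) :
    (PySem.List.pyRange 1 (k : Int) 1).foldl
      (fun (st : Int × Int × Int × Int × Int) j =>
        let (max_inc, max_i, max_j, min_val, min_i) := st
        let cur := PySem.List.pyGetD A j 0 - min_val
        let (max_inc, max_i, max_j) :=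
          if cur > max_inc then (cur, min_i, j) else (max_inc, max_i, max_j)
        if PySem.List.pyGetD A j 0 < min_val then
          (max_inc, max_i, max_j, PySem.List.pyGetD A j 0, j)
        else (max_inc, max_i, max_j, min_val, min_i))
      (PySem.List.pyGetD A 1 0 - PySem.List.pyGetD A 0 0, 0, 1, PySem.List.pyGetD A 0 0, 0)
    = ((bestF A k).1, (bestF A k).2.1, (bestF A k).2.2, A.getD (pm A k) 0, (pm A k : Int)) := by
  induction k, hk using Nat.le_induction with
  | base =>
    simp [PySem.List.pyRange_one_eq_nil (by omega : (1:Int) ≤ 1), bestF, pm,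
      PySem.List.pyGetD_ofNat', List.getD]
  | succ k hk ih =>
    have hbf : bestF A (k+1) = (if A.getD k 0 - A.getD (pm A k) 0 > (bestF A k).1
          then (A.getD k 0 - A.getD (pm A k) 0, (pm A k : Int), (k : Int)) else bestF A k) := by
      rw [bestF, if_neg (by omega : ¬ k = 0)]
    rw [show ((k + 1 : Nat) : Int) = (k : Int) + 1 by push_cast; ring,
        PySem.List.pyRange_one_succ_right (by exact_mod_cast hk),
        List.foldl_append, ih, List.foldl_cons, List.foldl_nil]
    simp only [PySem.List.pyGetD_natCast]
    rw [hbf, show pm A (k+1) = (if A.getD k 0 < A.getD (pm A k) 0 then k else pm A k) from rfl]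
    split_ifs with h1 h2 <;> simp_all [List.getD]

theorem pv_B_prefmin (A : List Int) (k : Nat) (hk : 2 ≤ k) :
    (PySem.List.pyRange 2 (k : Int) 1).foldl
      (fun (pmv : List Int) j =>
        let p := PySem.List.pyGetD pmv (j - 1) 0
        pmv ++ [if PySem.List.pyGetD A (j - 1) 0 < PySem.List.pyGetD A p 0 then j - 1 else p])
      [0, 0]
    = (List.range k).map (fun j => (pm A j : Int)) := by
  induction k, hk using Nat.le_induction with
  | base =>
    simp [PySem.List.pyRange_one_eq_nil (by omega : (2:Int) ≤ 2), List.range_succ, pm]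
  | succ k hk ih =>
    rw [show ((k + 1 : Nat) : Int) = (k : Int) + 1 by push_cast; ring,
        PySem.List.pyRange_one_succ_right (by exact_mod_cast hk), List.foldl_append, ih,
        List.foldl_cons, List.foldl_nil,
        show ((k : Int) - 1) = ((k - 1 : Nat) : Int) by omega]
    simp only [PySem.List.pyGetD_natCast]
    have hgetd : (((List.range k).map (fun j => (pm A j : Int))).getD (k-1) 0) = (pm A (k-1) : Int) := by
      rw [List.getD_eq_getElem?_getD]; simp [(by omega : k - 1 < k)]
    rw [hgetd, List.range_succ, List.map_append]
    simp only [List.map_cons, List.map_nil, PySem.List.pyGetD_natCast]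
    congr 2
    conv_rhs => rw [show k = (k-1)+1 by omega, pm]
    split_ifs <;> simp

theorem pv_B_loop (A : List Int) (n : Nat) (k : Nat) (hk : 1 ≤ k) (hkn : k ≤ n) :
    (PySem.List.pyRange 1 (k : Int) 1).foldl
      (fun (st : Int × Int × Int) j =>
        let cur := PySem.List.pyGetD A j 0 -
          PySem.List.pyGetD A (PySem.List.pyGetD ((List.range n).map (fun j => (pm A j : Int))) j 0) 0
        if cur > st.1 then (cur, PySem.List.pyGetD ((List.range n).map (fun j => (pm A j : Int))) j 0, j) else st)
      (PySem.List.pyGetD A 1 0 - PySem.List.pyGetD A 0 0, 0, 1)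
    = bestF A k := by
  revert hkn
  induction k, hk using Nat.le_induction with
  | base =>
    intro _
    simp [PySem.List.pyRange_one_eq_nil (by omega : (1:Int) ≤ 1), bestF,
      PySem.List.pyGetD_ofNat', List.getD]
  | succ k hk ih =>
    intro hkn
    rw [show ((k + 1 : Nat) : Int) = (k : Int) + 1 by push_cast; ring,
        PySem.List.pyRange_one_succ_right (by exact_mod_cast hk), List.foldl_append,
        ih (by omega), List.foldl_cons, List.foldl_nil]
    simp only [PySem.List.pyGetD_natCast]
    have hgetd : (((List.range n).map (fun j => (pm A j : Int))).getD k 0) = (pm A k : Int) := by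
      rw [List.getD_eq_getElem?_getD]; simp [(by omega : k < n)]
    rw [hgetd]
    simp only [PySem.List.pyGetD_natCast]
    rw [bestF, if_neg (by omega : ¬ k = 0)]

-- ===== VERDICT (by name: the statement is the Claim_ definition above) =====
theorem pv_guard (A : List Int) :
    (A = [] ∨ PySem.List.count A (PySem.List.pyGetD A 0 0) = A.length) ↔
    ((A.length : Int) = 0 ∨ (A.all (fun x => x == PySem.List.pyGetD A 0 0)) = true) := by
  rw [PySem.List.count_eq, List.count_eq_length, List.all_eq_true]
  constructor
  · rintro (h | h)
    · left; simp [h]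
    · right; intro x hx; rw [beq_iff_eq]; exact (h x hx).symm
  · rintro (h | h)
    · left; exact List.length_eq_zero_iff.mp (by exact_mod_cast h)
    · right; intro x hx; exact (beq_iff_eq.mp (h x hx)).symm

theorem find_significant_energy_increase_iterative_spec : Claim_equal_find_significant_energy_increase_iterative := by
  intro A _
  unfold Spec_find_significant_energy_increase_iterative
  unfold find_significant_energy_increase_iterative find_significant_energy_increase_iterative_alt
  by_cases hg : A = [] ∨ PySem.List.count A (PySem.List.pyGetD A 0 0) = A.length
  · rw [if_pos hg, if_pos ((pv_guard A).mp hg)]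
  · rw [if_neg hg, if_neg (fun h => hg ((pv_guard A).mpr h))]
    have hlen2 : 2 ≤ A.length := by
      rcases A with _ | ⟨a, _ | ⟨b, t⟩⟩
      · exact absurd (Or.inl rfl) hg
      · exact absurd (Or.inr (by simp [PySem.List.count, PySem.List.pyGetD])) hg
      · simp
    by_cases h2 : A.length = 2
    · rw [if_pos h2]
      have e2 : (A.length : Int) = (2:Int) := by exact_mod_cast h2
      rw [e2]
      simp [(by decide : PySem.List.pyRange (2:Int) 2 1 = ([]:List Int)),
            (by decide : PySem.List.pyRange (1:Int) 2 1 = [(1:Int)]),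
            (by decide : PySem.List.pyGetD [(0:Int),0] 1 0 = 0)]
    · rw [if_neg h2]
      simp only [pv_A_loop A A.length (by omega),
          pv_B_prefmin A A.length (by omega),
          pv_B_loop A A.length A.length (by omega) le_rfl]
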